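-- pv_equiv track=rewrite | github.com/david-cattermole/mayaMatchMoveSolver | python/mmSolver/tools/mmrendererlayers/lib.py | _generate_enum_name_string
-- ===== SOURCE A (Python) =====
-- def _generate_enum_name_string(enum_dict):
--     assert isinstance(enum_dict, dict)
--     values = enum_dict.values()
--     result_list = []
--     # A naive implementation, but it will work for small item counts.
--     for value1 in sorted(values):
--         for key, value2 in enum_dict.items():
--             if value1 == value2:
--                 result_list.append('{}={}'.format(key, value1))
--     return ':'.join(result_list)
-- ===== SOURCE B (Python) =====
-- def _generate_enum_name_string(enum_dict):
--     assert isinstance(enum_dict, dict)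
--     groups = {}
--     for key, value in enum_dict.items():
--         groups.setdefault(value, []).append('{}={}'.format(key, value))
--     result_list = []
--     for value in sorted(enum_dict.values()):
--         result_list.extend(groups[value])
--     return ':'.join(result_list)
-- ===== Notes on version B (the rewrite author's own statement) =====
-- stated objective: faster
-- what changed: B builds a value->['key=value'] grouping dict in one pass and then walks the sorted values once, instead of A's rescan of the whole dict for every occurrence of every sorted value.
import Mathlib
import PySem

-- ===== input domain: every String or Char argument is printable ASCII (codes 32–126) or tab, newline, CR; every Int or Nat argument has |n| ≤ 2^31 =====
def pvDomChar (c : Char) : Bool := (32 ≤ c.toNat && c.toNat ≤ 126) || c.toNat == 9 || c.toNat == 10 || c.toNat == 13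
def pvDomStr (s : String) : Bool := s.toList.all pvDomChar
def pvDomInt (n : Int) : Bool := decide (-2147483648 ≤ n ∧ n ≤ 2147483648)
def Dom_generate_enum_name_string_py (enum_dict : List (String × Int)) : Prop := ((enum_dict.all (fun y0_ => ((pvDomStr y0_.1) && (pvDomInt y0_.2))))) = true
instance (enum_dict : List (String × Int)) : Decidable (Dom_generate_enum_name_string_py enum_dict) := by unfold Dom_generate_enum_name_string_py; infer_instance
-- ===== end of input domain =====

-- B replaces A's inner scan over the whole dict (once per value occurrence) by a value→entries
-- grouping dict built in one pass, then one pass over the sorted values; objective: faster.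

-- ===== PORT A =====
-- '{}={}'.format(key, value1)
def pvFmt (k : String) (v : Int) : String := PySem.Str.join "" [k, "=", PySem.Int.toStr v]

def generate_enum_name_string_py (enum_dict : List (String × Int)) : String :=
  let d := PySem.Dict.ofList enum_dict
  let values := d.values
  let result_list :=
    (PySem.List.sorted values (fun v => v) false).foldl
      (fun acc value1 =>
        d.items.foldl
          (fun acc kv => if value1 = kv.2 then acc ++ [pvFmt kv.1 value1] else acc)
          acc)
      []
  PySem.Str.join ":" result_list

-- ===== PORT B =====
def generate_enum_name_string_py_alt (enum_dict : List (String × Int)) : String :=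
  let d := PySem.Dict.ofList enum_dict
  -- groups.setdefault(value, []).append('{}={}'.format(key, value))
  let groups : PySem.Dict Int (List String) :=
    d.items.foldl (fun g kv => g.modify kv.2 [] (fun t => t ++ [pvFmt kv.1 kv.2])) PySem.Dict.empty
  let result_list :=
    (PySem.List.sorted d.values (fun v => v) false).foldl
      (fun acc v => acc ++ groups.getD v []) []
  PySem.Str.join ":" result_list

-- ===== PRECONDITION & SPEC =====
def Spec_generate_enum_name_string_py (enum_dict : List (String × Int)) (out : String) : Prop := out = generate_enum_name_string_py_alt enum_dict
instance (enum_dict : List (String × Int)) (out : String) : Decidable (Spec_generate_enum_name_string_py enum_dict out) := by unfold Spec_generate_enum_name_string_py; infer_instance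

-- ===== CLAIM (what is proved, stated in full; the proofs are below) =====
def Claim_equal_generate_enum_name_string_py : Prop := ∀ (enum_dict : List (String × Int)), Dom_generate_enum_name_string_py enum_dict → Spec_generate_enum_name_string_py enum_dict (generate_enum_name_string_py enum_dict)

-- ===== LEMMAS AND PROOFS =====

-- B's grouping dict, looked up at v, is exactly the entries of the pairs whose value is v.
theorem getD_groups (l : List (String × Int)) (g : PySem.Dict Int (List String)) (v : Int) :
    (l.foldl (fun g kv => g.modify kv.2 [] (fun t => t ++ [pvFmt kv.1 kv.2])) g).getD v []
      = g.getD v [] ++ (l.filter (fun kv => decide (v = kv.2))).map (fun kv => pvFmt kv.1 kv.2) := by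
  induction l generalizing g with
  | nil => simp
  | cons kv rest ih =>
    simp only [List.foldl_cons, List.filter_cons]
    rw [ih]
    by_cases h : v = kv.2
    · subst h
      simp [PySem.Dict.getD_modify_self]
    · rw [PySem.Dict.getD_modify_of_ne (hne := h)]
      simp [h]

theorem generate_enum_name_string_py_eq (enum_dict : List (String × Int)) :
    generate_enum_name_string_py enum_dict = generate_enum_name_string_py_alt enum_dict := by
  simp only [generate_enum_name_string_py, generate_enum_name_string_py_alt]
  congr 1
  apply PySem.List.foldl_congr_mem
  intro acc v _
  have hb : (fun (acc : List String) (kv : String × Int) =>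
        if v = kv.2 then acc ++ [pvFmt kv.1 v] else acc)
      = (fun acc kv => if decide (v = kv.2) = true then acc ++ [pvFmt kv.1 v] else acc) := by
    funext acc kv; simp
  rw [hb, PySem.List.foldl_append_if, getD_groups]
  have he : (PySem.Dict.empty : PySem.Dict Int (List String)).getD v [] = [] := rfl
  rw [he, List.nil_append]
  congr 1
  apply List.map_congr_left
  intro kv hkv
  have hv : v = kv.2 := by
    have := (List.mem_filter.mp hkv).2
    simpa using this
  rw [hv]

-- ===== VERDICT (by name: the statement is the Claim_ definition above) =====
theorem generate_enum_name_string_py_spec : Claim_equal_generate_enum_name_string_py := by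
  intro enum_dict _
  unfold Spec_generate_enum_name_string_py
  exact generate_enum_name_string_py_eq enum_dict
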